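-- pv_equiv track=rewrite | github.com/YoManFeed/course_work | generating_archs.py | external_checker
-- ===== SOURCE A (Python) =====
-- def external_checker(code: list[int]) -> bool:
--     counter = 0
--     for digit in code:
--         # TODO выяснить на что заменить 3 в общем случае
--         # TODO вообще надо написать функцию глубины, которая запоминает самую длинную убывающую последовательность
--         if digit != 0:
--             counter += 1
--             if counter > 3:
--                 return False
--         else:
--             counter = 0
--     return True
-- ===== SOURCE B (Python) =====
-- def external_checker(code: list[int]) -> bool:
--     # A run of more than 3 consecutive nonzero digits exists iff some
--     # window of 4 consecutive digits contains no zero.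
--     return all(0 in code[i:i + 4] for i in range(len(code) - 3))
-- ===== Notes on version B (the rewrite author's own statement) =====
-- stated objective: simpler
-- what changed: Replaces the stateful scan with a resetting counter by a stateless sliding-window check: every window of 4 consecutive digits must contain a zero.
import Mathlib
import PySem

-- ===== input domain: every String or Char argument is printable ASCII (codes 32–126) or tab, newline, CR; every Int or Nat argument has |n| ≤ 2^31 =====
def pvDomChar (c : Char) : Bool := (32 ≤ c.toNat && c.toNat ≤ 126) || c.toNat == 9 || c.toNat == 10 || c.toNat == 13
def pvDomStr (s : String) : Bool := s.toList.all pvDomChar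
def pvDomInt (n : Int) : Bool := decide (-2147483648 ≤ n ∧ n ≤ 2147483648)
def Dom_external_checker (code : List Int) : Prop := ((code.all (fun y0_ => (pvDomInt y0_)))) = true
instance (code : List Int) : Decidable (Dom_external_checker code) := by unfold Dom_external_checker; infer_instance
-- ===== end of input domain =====

-- B replaces A's resetting counter by a stateless sliding-window check
-- (every window of 4 consecutive digits contains a zero); objective: simpler.

-- ===== PORT A =====
-- loop over code with counter; early return False when counter exceeds 3
def external_checker_loop (code : List Int) (counter : Int) : Bool :=
  match code with
  | [] => true
  | digit :: rest =>
    if digit ≠ 0 then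
      if counter + 1 > 3 then false
      else external_checker_loop rest (counter + 1)
    else external_checker_loop rest 0

def external_checker (code : List Int) : Bool := external_checker_loop code 0

-- ===== PORT B =====
-- all(0 in code[i:i+4] for i in range(len(code) - 3))
def external_checker_alt (code : List Int) : Bool :=
  (PySem.List.pyRange 0 ((code.length : Int) - 3) 1).all
    (fun i => decide ((0 : Int) ∈ PySem.List.slice code (some i) (some (i + 4))))

-- ===== PRECONDITION & SPEC =====
def Spec_external_checker (code : List Int) (out : Bool) : Prop := out = external_checker_alt code
instance (code : List Int) (out : Bool) : Decidable (Spec_external_checker code out) := by unfold Spec_external_checker; infer_instance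

-- ===== CLAIM (what is proved, stated in full; the proofs are below) =====
def Claim_equal_external_checker : Prop := ∀ (code : List Int), Dom_external_checker code → Spec_external_checker code (external_checker code)

-- ===== LEMMAS AND PROOFS =====

-- structural form of B's window check
def pvWrec : List Int → Bool
  | [] => true
  | d :: rest =>
    ((if 3 ≤ rest.length then decide ((0 : Int) ∈ (d :: rest).take 4) else true)
      && pvWrec rest)

-- length of the leading run of nonzero digits
def pvLead : List Int → Nat
  | [] => 0
  | d :: rest => if d = 0 then 0 else pvLead rest + 1

theorem pvLead_le_length (xs : List Int) : pvLead xs ≤ xs.length := by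
  induction xs with
  | nil => simp [pvLead]
  | cons d rest ih =>
    by_cases hd : d = 0
    · simp [pvLead, hd]
    · simp [pvLead, hd]; omega

theorem pvLead_not_mem_take (xs : List Int) :
    ∀ k : Nat, k ≤ pvLead xs → (0 : Int) ∉ xs.take k := by
  induction xs with
  | nil => intro k _; simp
  | cons d rest ih =>
    intro k hk
    match k with
    | 0 => simp
    | k + 1 =>
      by_cases hd : d = 0
      · simp [pvLead, hd] at hk
      · simp [pvLead, hd] at hk
        simp [List.take_succ_cons]
        exact ⟨fun h => hd h.symm, ih k (by omega)⟩

theorem pvLead_mem_take (xs : List Int) :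
    ∀ k : Nat, pvLead xs < k → pvLead xs < xs.length → (0 : Int) ∈ xs.take k := by
  induction xs with
  | nil => intro k _ h; simp at h
  | cons d rest ih =>
    intro k hk hlen
    by_cases hd : d = 0
    · subst hd
      match k with
      | 0 => simp [pvLead] at hk
      | k + 1 => simp [List.take_succ_cons]
    · simp [pvLead, hd] at hk hlen
      match k with
      | 0 => omega
      | k + 1 =>
        simp [List.take_succ_cons]
        exact Or.inr (ih k (by omega) (by omega))

theorem pvWrec_false_of_lead_ge (xs : List Int) (h : 4 ≤ pvLead xs) :
    pvWrec xs = false := by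
  match xs with
  | [] => simp [pvLead] at h
  | d :: rest =>
    have hd : ¬ d = 0 := by
      intro hd; simp [pvLead, hd] at h
    have hlr : 3 ≤ pvLead rest := by simp [pvLead, hd] at h; omega
    have hlen : 3 ≤ rest.length := le_trans hlr (pvLead_le_length rest)
    have hnm : (0 : Int) ∉ (d :: rest).take 4 :=
      pvLead_not_mem_take (d :: rest) 4 (by simp [pvLead, hd]; omega)
    have hfalse : (decide ((0 : Int) ∈ (d :: rest).take 4)) = false := by
      simpa using hnm
    show ((if 3 ≤ rest.length then decide ((0 : Int) ∈ (d :: rest).take 4) else true)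
        && pvWrec rest) = false
    rw [if_pos hlen, hfalse, Bool.false_and]

-- A's loop equals the window check plus a constraint on the pending counter
theorem pvLoop_eq (code : List Int) :
    ∀ c : Int, 0 ≤ c → c ≤ 3 →
      external_checker_loop code c
        = (pvWrec code && decide (c + (min (pvLead code) 4 : Nat) ≤ 3)) := by
  induction code with
  | nil =>
    intro c h0 h3
    simp [external_checker_loop, pvWrec, pvLead]
    omega
  | cons d rest ih =>
    intro c h0 h3
    by_cases hd : d = 0
    · subst hd
      have hguard : (if 3 ≤ rest.length then decide ((0 : Int) ∈ ((0 : Int) :: rest).take 4) else true) = true := by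
        split <;> simp [List.take_succ_cons]
      have hdec : (decide (c + (min (pvLead ((0 : Int) :: rest)) 4 : Nat) ≤ 3)) = true := by
        simp [pvLead]; omega
      rw [show external_checker_loop (0 :: rest) c = external_checker_loop rest 0 by
            simp [external_checker_loop],
          ih 0 le_rfl (by norm_num)]
      simp only [pvWrec, hguard, hdec, Bool.true_and, Bool.and_true]
      by_cases hlr : 4 ≤ pvLead rest
      · rw [pvWrec_false_of_lead_ge rest hlr]; simp
      · have : (decide ((0:Int) + (min (pvLead rest) 4 : Nat) ≤ 3)) = true := by
          simp; omega
        rw [this]; simp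
    · have hstep : external_checker_loop (d :: rest) c
          = if c + 1 > 3 then false else external_checker_loop rest (c + 1) := by
        simp [external_checker_loop, hd]
      have hlead : pvLead (d :: rest) = pvLead rest + 1 := by simp [pvLead, hd]
      by_cases hc : c + 1 > 3
      · have : (decide (c + (min (pvLead (d :: rest)) 4 : Nat) ≤ 3)) = false := by
          simp [hlead]; omega
        rw [hstep, if_pos hc, this]; simp
      · rw [hstep, if_neg hc, ih (c + 1) (by omega) (by omega)]
        by_cases hlr : 3 ≤ pvLead rest
        · have h1 : (decide (c + 1 + (min (pvLead rest) 4 : Nat) ≤ 3)) = false := by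
            simp; omega
          have h2 : (decide (c + (min (pvLead (d :: rest)) 4 : Nat) ≤ 3)) = false := by
            simp [hlead]; omega
          rw [h1, h2]; simp
        · have hguard : (if 3 ≤ rest.length then decide ((0 : Int) ∈ (d :: rest).take 4) else true) = true := by
            split
            · exact decide_eq_true
                (pvLead_mem_take (d :: rest) 4 (by simp [hlead]; omega)
                  (by simp [hlead]; omega))
            · rfl
          have hdec : (decide (c + 1 + (min (pvLead rest) 4 : Nat) ≤ 3))
              = (decide (c + (min (pvLead (d :: rest)) 4 : Nat) ≤ 3)) := by
            simp [hlead]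
            constructor <;> intro <;> omega
          simp only [pvWrec, hguard, Bool.true_and, hdec]

-- B's pyRange/slice expression equals the structural window check
theorem pvAlt_eq_wrec (code : List Int) : external_checker_alt code = pvWrec code := by
  have hrange : ∀ xs : List Int, external_checker_alt xs
      = (List.range (xs.length - 3)).all
          (fun k => decide ((0 : Int) ∈ (xs.drop k).take 4)) := by
    intro xs
    unfold external_checker_alt
    rw [PySem.List.pyRange_one 0 ((xs.length : Int) - 3)]
    have htn : (((xs.length : Int) - 3) - 0).toNat = xs.length - 3 := by omega
    rw [htn, List.all_map]
    congr 1
    funext k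
    simp only [Function.comp_apply, zero_add]
    rw [show ((k : Int) + 4) = ((k : Int) + ((4 : Nat) : Int)) by norm_num,
        PySem.List.slice_natCast_add]
  induction code with
  | nil => simp [hrange, pvWrec]
  | cons d rest ih =>
    rw [hrange, pvWrec, ← ih, hrange]
    by_cases hlen : 3 ≤ rest.length
    · have h1 : (d :: rest).length - 3 = (rest.length - 3) + 1 := by
        simp [List.length_cons]; omega
      rw [h1, List.range_succ_eq_map]
      simp only [List.all_cons, List.all_map, List.drop_zero, if_pos hlen]
      rfl
    · have h1 : (d :: rest).length - 3 = 0 := by simp [List.length_cons]; omega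
      have h2 : rest.length - 3 = 0 := by omega
      rw [h1, h2]
      simp [hlen]

-- ===== VERDICT (by name: the statement is the Claim_ definition above) =====
theorem external_checker_spec : Claim_equal_external_checker := by
  intro code _
  unfold Spec_external_checker external_checker
  rw [pvAlt_eq_wrec, pvLoop_eq code 0 le_rfl (by norm_num)]
  by_cases h : 4 ≤ pvLead code
  · rw [pvWrec_false_of_lead_ge code h]; simp
  · have hdec : (decide ((0 : Int) + (min (pvLead code) 4 : Nat) ≤ 3)) = true := by
      simp; omega
    rw [hdec]; simp
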